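-- pv_equiv track=rewrite | github.com/KlparetlR/amachoco3-RenPy | patchX.py | parse_script_blocks
-- ===== SOURCE A (Python) =====
-- def parse_script_blocks(script_lines):
--     # 脚本以 say 为区块分割
--     blocks = []
--     current_block = []
--     for line in script_lines:
--         if line.strip().startswith('say '):
--             current_block.append(line)
--             blocks.append(current_block)
--             current_block = []
--         else:
--             current_block.append(line)
--     if current_block:
--         blocks.append(current_block)
--     return blocks
-- ===== SOURCE B (Python) =====
-- def parse_script_blocks(script_lines):
--     def is_say(line):
--         return line.strip().startswith('say ')
--     blocks = []
--     rest = script_lines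
--     while True:
--         i = next((k for k, ln in enumerate(rest) if is_say(ln)), None)
--         if i is None:
--             if rest:
--                 blocks.append(rest)
--             return blocks
--         blocks.append(rest[:i + 1])
--         rest = rest[i + 1:]
-- ===== Notes on version B (the rewrite author's own statement) =====
-- stated objective: alternative
-- what changed: B repeatedly finds the index of the next 'say' line and cuts the list into blocks by slicing at those boundaries, instead of A's line-by-line loop that grows a mutable current block and flushes it at each 'say' line.
import Mathlib
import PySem

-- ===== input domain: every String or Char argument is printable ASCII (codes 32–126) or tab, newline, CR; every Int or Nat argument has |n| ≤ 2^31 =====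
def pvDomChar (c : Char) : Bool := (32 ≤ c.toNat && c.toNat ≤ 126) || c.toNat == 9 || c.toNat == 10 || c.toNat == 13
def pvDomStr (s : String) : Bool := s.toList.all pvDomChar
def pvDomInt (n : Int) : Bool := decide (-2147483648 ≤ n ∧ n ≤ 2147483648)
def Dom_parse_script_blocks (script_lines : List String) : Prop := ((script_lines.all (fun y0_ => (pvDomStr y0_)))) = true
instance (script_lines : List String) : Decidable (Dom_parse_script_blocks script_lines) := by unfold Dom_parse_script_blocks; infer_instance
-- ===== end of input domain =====

-- B cuts the script at 'say'-line boundaries found by index search and emits blocks by slicing,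
-- instead of A's line-by-line accumulation; a different decomposition, same cost (objective: alternative).

-- line.strip().startswith('say ')  (shared by both Pythons, verbatim)
def pvIsSay (line : String) : Bool := PySem.Str.startswith (PySem.Str.strip line) "say "

-- ===== PORT A =====
-- for line in script_lines: grow current_block, flush it at each 'say' line; then flush the leftover
def parse_script_blocks (script_lines : List String) : List (List String) :=
  let st := script_lines.foldl
    (fun (st : List (List String) × List String) line =>
      if pvIsSay line then (st.1 ++ [st.2 ++ [line]], ([] : List String))
      else (st.1, st.2 ++ [line]))
    ([], [])
  if st.2 ≠ [] then st.1 ++ [st.2] else st.1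

-- ===== PORT B =====
-- the while loop of Source B as recursion on `rest`: find the first 'say' index, cut there, repeat.
-- next((k for k, ln in enumerate(rest) if is_say(ln)), None) = rest.findIdx? pvIsSay;
-- rest[:i+1] / rest[i+1:] with 0 ≤ i+1 ≤ len(rest) are exactly take/drop.
def pvAltGo (blocks : List (List String)) (rest : List String) : List (List String) :=
  match h : rest.findIdx? pvIsSay with
  | none => if rest ≠ [] then blocks ++ [rest] else blocks
  | some i =>
      pvAltGo (blocks ++ [rest.take (i + 1)]) (rest.drop (i + 1))
termination_by rest.length
decreasing_by
  have hne : rest ≠ [] := by rintro rfl; simp at h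
  have : 0 < rest.length := List.length_pos_iff.mpr hne
  simp [List.length_drop]; omega

def parse_script_blocks_alt (script_lines : List String) : List (List String) :=
  pvAltGo [] script_lines

-- ===== PRECONDITION & SPEC =====
def Spec_parse_script_blocks (script_lines : List String) (out : List (List String)) : Prop := out = parse_script_blocks_alt script_lines
instance (script_lines : List String) (out : List (List String)) : Decidable (Spec_parse_script_blocks script_lines out) := by unfold Spec_parse_script_blocks; infer_instance

-- ===== CLAIM (what is proved, stated in full; the proofs are below) =====
def Claim_equal_parse_script_blocks : Prop := ∀ (script_lines : List String), Dom_parse_script_blocks script_lines → Spec_parse_script_blocks script_lines (parse_script_blocks script_lines)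

-- ===== LEMMAS AND PROOFS =====

-- clean unfolding equations for pvAltGo
theorem pvAltGo_none {rest : List String} (h : rest.findIdx? pvIsSay = none)
    (blocks : List (List String)) :
    pvAltGo blocks rest = if rest ≠ [] then blocks ++ [rest] else blocks := by
  rw [pvAltGo]
  split <;> simp_all

theorem pvAltGo_some {rest : List String} {i : Nat} (h : rest.findIdx? pvIsSay = some i)
    (blocks : List (List String)) :
    pvAltGo blocks rest = pvAltGo (blocks ++ [rest.take (i + 1)]) (rest.drop (i + 1)) := by
  rw [pvAltGo]
  split <;> simp_all

-- prepend `cur` onto the first block of `gs` (or make it a lone block if there is none and it is nonempty)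
def pvAddPrefix (cur : List String) (gs : List (List String)) : List (List String) :=
  match gs with
  | [] => if cur ≠ [] then [cur] else []
  | g :: gs' => (cur ++ g) :: gs'

theorem pvAddPrefix_nil (gs : List (List String)) : pvAddPrefix [] gs = gs := by
  cases gs <;> simp [pvAddPrefix]

-- the blocks accumulator of pvAltGo only ever gets appended to
theorem pvAltGo_acc (rest : List String) (blocks : List (List String)) :
    pvAltGo blocks rest = blocks ++ pvAltGo [] rest := by
  induction hn : rest.length using Nat.strong_induction_on generalizing rest blocks with
  | _ n ih =>
    cases h : rest.findIdx? pvIsSay with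
    | none =>
      rw [pvAltGo_none h, pvAltGo_none h]
      split <;> simp
    | some i =>
      have hne : rest ≠ [] := by rintro rfl; simp at h
      have hpos : 0 < rest.length := List.length_pos_iff.mpr hne
      have hlt : (rest.drop (i + 1)).length < n := by
        simp [List.length_drop]; omega
      rw [pvAltGo_some h, pvAltGo_some h,
        ih _ hlt _ _ rfl, ih _ hlt _ ([] ++ [rest.take (i + 1)]) rfl]
      simp

-- main invariant: A's fold from state (blocks, cur) is blocks ++ (B's blocks with cur glued onto the first)
theorem pv_main (rest : List String) (blocks : List (List String)) (cur : List String) :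
    (let st := rest.foldl
        (fun (st : List (List String) × List String) line =>
          if pvIsSay line then (st.1 ++ [st.2 ++ [line]], ([] : List String))
          else (st.1, st.2 ++ [line]))
        (blocks, cur)
      if st.2 ≠ [] then st.1 ++ [st.2] else st.1)
      = blocks ++ pvAddPrefix cur (pvAltGo [] rest) := by
  induction rest generalizing blocks cur with
  | nil =>
    rw [pvAltGo_none (by simp)]
    simp only [List.foldl_nil]
    by_cases hc : cur = [] <;> simp [pvAddPrefix, hc]
  | cons l rest' ih =>
    simp only [List.foldl_cons]
    by_cases hl : pvIsSay l
    · rw [if_pos hl, ih]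
      have hfind : (l :: rest').findIdx? pvIsSay = some 0 := by
        simp [List.findIdx?_cons, hl]
      rw [pvAltGo_some hfind, show ([] ++ [(l :: rest').take (0 + 1)]) = [[l]] by simp,
        List.drop_succ_cons, List.drop_zero, pvAltGo_acc rest' [[l]]]
      cases pvAltGo [] rest' <;> simp [pvAddPrefix]
    · rw [if_neg hl, ih]
      cases h' : rest'.findIdx? pvIsSay with
      | none =>
        have hfind : (l :: rest').findIdx? pvIsSay = none := by
          simp [List.findIdx?_cons, hl, h']
        rw [pvAltGo_none hfind, pvAltGo_none h']
        by_cases hr : rest' = [] <;> simp [pvAddPrefix, hr]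
      | some i =>
        have hfind : (l :: rest').findIdx? pvIsSay = some (i + 1) := by
          simp [List.findIdx?_cons, hl, h']
        rw [pvAltGo_some hfind, pvAltGo_some h',
          pvAltGo_acc (rest'.drop (i + 1)), pvAltGo_acc ((l :: rest').drop (i + 1 + 1))]
        simp [pvAddPrefix, List.take_succ_cons, List.drop_succ_cons]

-- ===== VERDICT (by name: the statement is the Claim_ definition above) =====
theorem parse_script_blocks_spec : Claim_equal_parse_script_blocks := by
  intro ls _
  unfold Spec_parse_script_blocks parse_script_blocks parse_script_blocks_alt
  have := pv_main ls [] []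
  simpa [pvAddPrefix_nil] using this
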